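-- pv_equiv track=rewrite | github.com/AndresMontero/coding_interview | problems/largest_mountain.py | largest_mountain_2
-- ===== SOURCE A (Python) =====
-- def largest_mountain_2(heights):
--     max_mountain_height = 0  # Initialize the maximum mountain height to 0
--
--     # Iterate through each index in the array
--     for i in range(1, len(heights) - 1):
--         for peak_height in range(heights[i], 0, -1):  # Try decreasing the height at index i
--
--             left, right = i, i  # Initialize pointers for left and right traversal
--             left_height, right_height = 1, 1  # Initialize the left and right mountain height to 1
--             current_peak_height = peak_height  # Initialize the current peak height
--
--             if peak_height < max_mountain_height:
--                 # is possible peak is less than max we can skip since we care only about max height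
--                 continue
--             # Move towards the left end to find the height of the left slope
--             while left > 0 and current_peak_height > 1:
--                 if heights[left - 1] >= current_peak_height - 1:  # Mountain can extend
--                     left_height += 1
--                 else:  # Mountain cannot extend, break
--                     break
--                 current_peak_height -= 1
--                 left -= 1
--
--             current_peak_height = peak_height  # Reset the current peak height for the right slope
--
--             # Move towards the right end to find the height of the right slope
--             while right < len(heights) - 1 and current_peak_height > 1:
--                 if heights[right + 1] >= current_peak_height - 1:  # Mountain can extend
--                     right_height += 1
--                 else:  # Mountain cannot extend, break
--                     break
--                 current_peak_height -= 1
--                 right += 1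
--
--             # The height of the mountain will be the minimum of left and right mountain heights
--             mountain_height = min(left_height, right_height)
--
--             # Update the maximum mountain height if the current mountain height is greater
--             max_mountain_height = max(max_mountain_height, mountain_height)
--
--     return max_mountain_height
-- ===== SOURCE B (Python) =====
-- def largest_mountain_2(heights):
--     # O(n): prefix/suffix "ramp" arrays; best peak at i is min(L[i], R[i]).
--     L = []
--     prev = 0
--     for h in heights:
--         prev = max(0, min(h, prev + 1))
--         L.append(prev)
--     R = []
--     prev = 0
--     for h in reversed(heights):
--         prev = max(0, min(h, prev + 1))
--         R.append(prev)
--     R.reverse()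
--     best = 0
--     for i in range(1, len(heights) - 1):
--         best = max(best, min(L[i], R[i]))
--     return best
-- ===== Notes on version B (the rewrite author's own statement) =====
-- stated objective: faster
-- what changed: Replaces A's per-index search over every candidate peak height (each tried with two pointer walks) by two linear ramp sweeps L[i]=max(0,min(h[i],L[i-1]+1)) from the left and right; the best mountain at i is min(L[i],R[i]).
import Mathlib
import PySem

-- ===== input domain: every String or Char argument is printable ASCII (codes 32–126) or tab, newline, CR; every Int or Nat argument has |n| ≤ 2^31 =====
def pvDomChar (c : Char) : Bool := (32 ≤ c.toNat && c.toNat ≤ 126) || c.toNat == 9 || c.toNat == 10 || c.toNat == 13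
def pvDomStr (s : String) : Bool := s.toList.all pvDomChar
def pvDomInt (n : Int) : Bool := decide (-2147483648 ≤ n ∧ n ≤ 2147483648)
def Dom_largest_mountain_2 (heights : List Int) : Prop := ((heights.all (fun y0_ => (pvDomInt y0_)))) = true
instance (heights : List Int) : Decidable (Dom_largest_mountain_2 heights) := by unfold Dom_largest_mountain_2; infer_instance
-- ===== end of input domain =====

-- B replaces A's per-index search over all candidate peak heights (each with two
-- pointer walks) by two linear "ramp" sweeps L/R with best peak at i = min(L[i], R[i]);
-- objective: faster (asymptotic).

-- ===== PORT A =====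
-- the left while-loop of A: state (left, left_height, current_peak_height)
def lmLeft (heights : List Int) (left lh cp : Int) : Int :=
  if _h : 0 < left ∧ 1 < cp then
    if PySem.List.pyGetD heights (left - 1) 0 ≥ cp - 1 then
      lmLeft heights (left - 1) (lh + 1) (cp - 1)
    else lh
  else lh
termination_by cp.toNat
decreasing_by omega

-- the right while-loop of A: state (right, right_height, current_peak_height)
def lmRight (heights : List Int) (n right rh cp : Int) : Int :=
  if _h : right < n - 1 ∧ 1 < cp then
    if PySem.List.pyGetD heights (right + 1) 0 ≥ cp - 1 then
      lmRight heights n (right + 1) (rh + 1) (cp - 1)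
    else rh
  else rh
termination_by cp.toNat
decreasing_by omega

-- the inner 'for peak_height in range(heights[i], 0, -1)' loop with the skip-continue
def lmInner (heights : List Int) (i : Int) : Int → List Int → Int
  | acc, [] => acc
  | acc, p :: rest =>
    if p < acc then lmInner heights i acc rest
    else
      lmInner heights i
        (max acc (min (lmLeft heights i 1 p)
                      (lmRight heights (heights.length : Int) i 1 p))) rest

def largest_mountain_2 (heights : List Int) : Int :=
  (PySem.List.pyRange 1 ((heights.length : Int) - 1) 1).foldl
    (fun acc i =>
      lmInner heights i acc (PySem.List.pyRange (PySem.List.pyGetD heights i 0) 0 (-1))) 0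

-- ===== PORT B =====
-- the ramp sweep: prev = max(0, min(h, prev+1)) accumulated into a list
def lmRamp (prev : Int) : List Int → List Int
  | [] => []
  | x :: t => (max 0 (min x (prev + 1))) :: lmRamp (max 0 (min x (prev + 1))) t

def largest_mountain_2_alt (heights : List Int) : Int :=
  let L := lmRamp 0 heights
  let R := (lmRamp 0 heights.reverse).reverse
  (PySem.List.pyRange 1 ((heights.length : Int) - 1) 1).foldl
    (fun best i => max best (min (PySem.List.pyGetD L i 0) (PySem.List.pyGetD R i 0))) 0

-- ===== PRECONDITION & SPEC =====
def Spec_largest_mountain_2 (heights : List Int) (out : Int) : Prop := out = largest_mountain_2_alt heights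
instance (heights : List Int) (out : Int) : Decidable (Spec_largest_mountain_2 heights out) := by unfold Spec_largest_mountain_2; infer_instance

-- ===== CLAIM (what is proved, stated in full; the proofs are below) =====
def Claim_equal_largest_mountain_2 : Prop := ∀ (heights : List Int), Dom_largest_mountain_2 heights → Spec_largest_mountain_2 heights (largest_mountain_2 heights)

-- ===== LEMMAS AND PROOFS =====

theorem lmRamp_length (p : Int) (l : List Int) : (lmRamp p l).length = l.length := by
  induction l generalizing p with
  | nil => rfl
  | cons x t ih => simp [lmRamp, ih]

theorem lmRamp_nonneg (p : Int) (l : List Int) (i : ℕ) : 0 ≤ (lmRamp p l).getD i 0 := by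
  induction l generalizing p i with
  | nil => simp [lmRamp]
  | cons x t ih =>
    cases i with
    | zero => simp [lmRamp]
    | succ j => simpa [lmRamp] using ih _ j

theorem lmRamp_zero (p : Int) (l : List Int) (h : l ≠ []) :
    (lmRamp p l).getD 0 0 = max 0 (min (l.getD 0 0) (p + 1)) := by
  cases l with
  | nil => exact absurd rfl h
  | cons x t => simp [lmRamp]

theorem lmRamp_rec (l : List Int) (p : Int) (i : ℕ) (hi : i + 1 < l.length) :
    (lmRamp p l).getD (i + 1) 0
      = max 0 (min (l.getD (i + 1) 0) ((lmRamp p l).getD i 0 + 1)) := by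
  induction l generalizing p i with
  | nil => simp at hi
  | cons x t ih =>
    cases i with
    | zero =>
      cases t with
      | nil => simp at hi
      | cons y t' => simp [lmRamp]
    | succ j =>
      have := ih (max 0 (min x (p + 1))) j (by simpa using hi)
      simpa [lmRamp] using this

theorem lmRamp_le_max (hs : List Int) (i : ℕ) (hi : i < hs.length) :
    (lmRamp 0 hs).getD i 0 ≤ max 0 (hs.getD i 0) := by
  cases i with
  | zero =>
    have := lmRamp_zero 0 hs (by intro h; simp [h] at hi)
    omega
  | succ j =>
    have := lmRamp_rec hs 0 j hi
    omega

theorem lmRamp_succ_le (hs : List Int) (i : ℕ) (hi : i + 1 < hs.length) :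
    (lmRamp 0 hs).getD (i + 1) 0 ≤ (lmRamp 0 hs).getD i 0 + 1 := by
  have h1 := lmRamp_rec hs 0 i hi
  have h2 := lmRamp_nonneg 0 hs i
  omega

theorem lmRamp_le_index (hs : List Int) (i : ℕ) (hi : i < hs.length) :
    (lmRamp 0 hs).getD i 0 ≤ (i : Int) + 1 := by
  induction i with
  | zero =>
    have := lmRamp_zero 0 hs (by intro h; simp [h] at hi)
    omega
  | succ j ih =>
    have h1 := lmRamp_succ_le hs j hi
    have h2 := ih (by omega)
    push_cast
    omega

-- if the slope condition holds for all offsets up to v-1, the ramp is at least v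
theorem lmRamp_ge (hs : List Int) (i : ℕ) (hi : i < hs.length) (v : Int)
    (hv : v ≤ (i : Int) + 1)
    (hslope : ∀ j : ℕ, (j : Int) ≤ v - 1 → v - (j : Int) ≤ hs.getD (i - j) 0) :
    v ≤ (lmRamp 0 hs).getD i 0 := by
  induction i generalizing v with
  | zero =>
    have hz := lmRamp_zero 0 hs (by intro h; simp [h] at hi)
    by_cases h0 : v ≤ 0
    · have := lmRamp_nonneg 0 hs 0; omega
    · have h1 : v = 1 := by omega
      have := hslope 0 (by omega)
      simp only [Nat.cast_zero, Nat.sub_zero, sub_zero] at this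
      omega
  | succ j ih =>
    by_cases h0 : v ≤ 0
    · have := lmRamp_nonneg 0 hs (j + 1); omega
    · have hrec := lmRamp_rec hs 0 j hi
      have hj0 := hslope 0 (by omega)
      simp only [Nat.cast_zero, Nat.sub_zero, sub_zero] at hj0
      have ihv : v - 1 ≤ (lmRamp 0 hs).getD j 0 := by
        refine ih (by omega) (v - 1) (by push_cast at hv ⊢; omega) ?_
        intro k hk
        have := hslope (k + 1) (by push_cast; omega)
        have hidx : j + 1 - (k + 1) = j - k := by omega
        rw [hidx] at this
        push_cast at this ⊢
        omega
      omega

-- the ramp value is realised by an actual slope: heights[i-j] ≥ L i - j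
theorem lmRamp_sound (hs : List Int) (i : ℕ) (hi : i < hs.length) (j : ℕ)
    (hj : (j : Int) ≤ (lmRamp 0 hs).getD i 0 - 1) :
    (lmRamp 0 hs).getD i 0 - (j : Int) ≤ hs.getD (i - j) 0 := by
  induction j generalizing i with
  | zero =>
    simp only [Nat.cast_zero, Nat.sub_zero, sub_zero] at hj ⊢
    cases i with
    | zero =>
      have := lmRamp_zero 0 hs (by intro h; simp [h] at hi)
      omega
    | succ k =>
      have := lmRamp_rec hs 0 k hi
      omega
  | succ k ih =>
    have hL2 : 2 ≤ (lmRamp 0 hs).getD i 0 := by push_cast at hj; omega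
    have hipos : 1 ≤ i := by
      rcases Nat.eq_zero_or_pos i with h | h
      · exfalso
        have := lmRamp_le_index hs i hi
        omega
      · exact h
    obtain ⟨i', rfl⟩ : ∃ i', i = i' + 1 := ⟨i - 1, by omega⟩
    have hrec := lmRamp_rec hs 0 i' hi
    have hstep := lmRamp_succ_le hs i' hi
    have := ih i' (by omega) (by push_cast at hj ⊢; omega)
    have hidx : i' + 1 - (k + 1) = i' - k := by omega
    rw [hidx]
    push_cast at this ⊢
    omega

-- left while-loop: result is at most lh + (cp - 1) extensions
theorem lmLeft_le (hs : List Int) (left lh cp : Int) :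
    lmLeft hs left lh cp ≤ lh + max 0 (cp - 1) := by
  induction left, lh, cp using lmLeft.induct hs with
  | case1 left lh cp hcond hif ih => rw [lmLeft, dif_pos hcond, if_pos hif]; omega
  | case2 left lh cp hcond hif => rw [lmLeft, dif_pos hcond, if_neg hif]; omega
  | case3 left lh cp hcond => rw [lmLeft, dif_neg hcond]; omega

-- left while-loop: if the slope never fails, the loop runs its full cp-1 steps
theorem lmLeft_full (hs : List Int) (left lh cp : Int)
    (h : ∀ j : Int, 1 ≤ j → j ≤ cp - 1 → j ≤ left ∧ cp - j ≤ PySem.List.pyGetD hs (left - j) 0) :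
    lmLeft hs left lh cp = lh + max 0 (cp - 1) := by
  induction left, lh, cp using lmLeft.induct hs with
  | case1 left lh cp hcond hif ih =>
    rw [lmLeft, dif_pos hcond, if_pos hif]
    rw [ih]
    · omega
    · intro j hj1 hj2
      have := h (j + 1) (by omega) (by omega)
      constructor
      · omega
      · have hidx : left - 1 - j = left - (j + 1) := by ring
        rw [hidx]
        omega
  | case2 left lh cp hcond hif =>
    exfalso
    have := h 1 (by omega) (by omega)
    omega
  | case3 left lh cp hcond =>
    rw [lmLeft, dif_neg hcond]
    rcases (not_and_or.mp hcond) with h1 | h2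
    · by_cases hcp : cp ≤ 1
      · omega
      · exfalso
        have := h 1 (by omega) (by omega)
        omega
    · omega

-- left while-loop: every extension it made is backed by the slope condition
theorem lmLeft_sound (hs : List Int) (left lh cp : Int) :
    lh ≤ lmLeft hs left lh cp ∧
    ∀ j : Int, 1 ≤ j → j ≤ lmLeft hs left lh cp - lh →
      j ≤ left ∧ cp - j ≤ PySem.List.pyGetD hs (left - j) 0 := by
  induction left, lh, cp using lmLeft.induct hs with
  | case1 left lh cp hcond hif ih =>
    rw [lmLeft, dif_pos hcond, if_pos hif]
    obtain ⟨ih1, ih2⟩ := ih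
    refine ⟨by omega, ?_⟩
    intro j hj1 hj2
    by_cases hj : j = 1
    · subst hj
      exact ⟨by omega, by omega⟩
    · have := ih2 (j - 1) (by omega) (by omega)
      have hidx : left - 1 - (j - 1) = left - j := by ring
      rw [hidx] at this
      exact ⟨by omega, by omega⟩
  | case2 left lh cp hcond hif =>
    rw [lmLeft, dif_pos hcond, if_neg hif]
    exact ⟨le_refl _, by intro j h1 h2; omega⟩
  | case3 left lh cp hcond =>
    rw [lmLeft, dif_neg hcond]
    exact ⟨le_refl _, by intro j h1 h2; omega⟩

theorem pyGetD_reverse (l : List Int) (k : Int) (d : Int) (h0 : 0 ≤ k) (h1 : k < l.length) :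
    PySem.List.pyGetD l.reverse k d = PySem.List.pyGetD l ((l.length : Int) - 1 - k) d := by
  rw [PySem.List.pyGetD_eq_getElem l.reverse d h0 (by simpa using h1),
      PySem.List.pyGetD_eq_getElem l d (by omega) (by omega)]
  rw [List.getElem_reverse]
  congr 1
  omega

-- the right while-loop is the left while-loop on the reversed list
theorem lmRight_eq (hs : List Int) (right rh cp : Int) (h0 : 0 ≤ right) :
    lmRight hs (hs.length : Int) right rh cp
      = lmLeft hs.reverse ((hs.length : Int) - 1 - right) rh cp := by
  induction right, rh, cp using lmRight.induct hs (hs.length : Int) with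
  | case1 right rh cp hcond hif ih =>
    rw [lmRight, dif_pos hcond, if_pos hif]
    rw [lmLeft, dif_pos (by omega : 0 < (hs.length : Int) - 1 - right ∧ 1 < cp)]
    have hrev : PySem.List.pyGetD hs.reverse ((hs.length : Int) - 1 - right - 1) 0
        = PySem.List.pyGetD hs (right + 1) 0 := by
      rw [pyGetD_reverse hs ((hs.length : Int) - 1 - right - 1) 0 (by omega) (by omega)]
      congr 1
      omega
    rw [if_pos (by rw [hrev]; exact hif)]
    have := ih (by omega)
    rw [this]
    congr 1
    omega
  | case2 right rh cp hcond hif =>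
    rw [lmRight, dif_pos hcond, if_neg hif]
    rw [lmLeft, dif_pos (by omega : 0 < (hs.length : Int) - 1 - right ∧ 1 < cp)]
    rw [if_neg]
    rw [pyGetD_reverse hs ((hs.length : Int) - 1 - right - 1) 0 (by omega) (by omega)]
    have hidx : (hs.length : Int) - 1 - ((hs.length : Int) - 1 - right - 1) = right + 1 := by ring
    rw [hidx]
    exact hif
  | case3 right rh cp hcond =>
    rw [lmRight, dif_neg hcond, lmLeft, dif_neg (by omega)]

-- the inner loop (with its skip) is a plain fold of max over the candidate values
theorem lmInner_eq_foldl (hs : List Int) (i : Int) (ps : List Int) (acc : Int)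
    (hle : ∀ p ∈ ps, min (lmLeft hs i 1 p) (lmRight hs (hs.length : Int) i 1 p) ≤ p) :
    lmInner hs i acc ps
      = (ps.map (fun p => min (lmLeft hs i 1 p) (lmRight hs (hs.length : Int) i 1 p))).foldl max acc := by
  induction ps generalizing acc with
  | nil => rfl
  | cons p rest ih =>
    have hp := hle p (List.mem_cons_self)
    have hrest : ∀ q ∈ rest, min (lmLeft hs i 1 q) (lmRight hs (hs.length : Int) i 1 q) ≤ q :=
      fun q hq => hle q (List.mem_cons_of_mem _ hq)
    by_cases hskip : p < acc
    · rw [lmInner, if_pos hskip, ih _ hrest]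
      simp only [List.map_cons, List.foldl_cons]
      congr 1
      omega
    · rw [lmInner, if_neg hskip, ih _ hrest]
      simp only [List.map_cons, List.foldl_cons]

theorem foldl_max_le (l : List Int) (a M : Int) (ha : a ≤ M) (h : ∀ x ∈ l, x ≤ M) :
    l.foldl max a ≤ M := by
  induction l generalizing a with
  | nil => simpa using ha
  | cons x t ih =>
    simp only [List.foldl_cons]
    exact ih (max a x) (by have := h x List.mem_cons_self; omega)
      (fun y hy => h y (List.mem_cons_of_mem _ hy))

theorem getD_reverse (l : List Int) (k : ℕ) (hk : k < l.length) :
    l.reverse.getD k 0 = l.getD (l.length - 1 - k) 0 := by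
  rw [List.getD_eq_getElem _ _ (by simpa using hk), List.getD_eq_getElem _ _ (by omega),
      List.getElem_reverse]

-- any value the left loop reaches is bounded by the ramp value at that index
theorem lmLeft_le_ramp (l : List Int) (k : ℕ) (hk : k < l.length) (p v : Int)
    (hv1 : 1 ≤ v) (hvp : v ≤ p) (hp : p ≤ l.getD k 0) (hvr : v ≤ lmLeft l (k : Int) 1 p) :
    v ≤ (lmRamp 0 l).getD k 0 := by
  obtain ⟨-, hsound⟩ := lmLeft_sound l (k : Int) 1 p
  have hk1 : v ≤ (k : Int) + 1 := by
    by_cases h2 : 2 ≤ v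
    · have := hsound (v - 1) (by omega) (by omega); omega
    · omega
  apply lmRamp_ge l k hk v hk1
  intro j hj
  by_cases hj0 : j = 0
  · subst hj0
    simp only [Nat.cast_zero, Nat.sub_zero, sub_zero]
    omega
  · obtain ⟨hjk, hslope⟩ := hsound (j : Int) (by omega) (by omega)
    have hcast : ((k - j : ℕ) : Int) = (k : Int) - (j : Int) := by omega
    rw [← hcast, PySem.List.pyGetD_natCast] at hslope
    omega

-- the left loop reaches any value the ramp allows
theorem lmLeft_ramp_full (l : List Int) (k : ℕ) (hk : k < l.length) (v : Int)
    (hv1 : 1 ≤ v) (hvL : v ≤ (lmRamp 0 l).getD k 0) :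
    lmLeft l (k : Int) 1 v = v := by
  have hLk := lmRamp_le_index l k hk
  rw [lmLeft_full]
  · omega
  · intro j hj1 hj2
    refine ⟨by omega, ?_⟩
    have hsd := lmRamp_sound l k hk j.toNat (by omega)
    have hcast : ((k - j.toNat : ℕ) : Int) = (k : Int) - j := by omega
    rw [← hcast, PySem.List.pyGetD_natCast]
    omega

-- the per-index step: A's inner loop yields max acc (min L[i] R[i])
theorem inner_step (hs : List Int) (i : Int) (acc : Int)
    (h1 : 1 ≤ i) (h2 : i ≤ (hs.length : Int) - 2) (hacc : 0 ≤ acc) :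
    lmInner hs i acc (PySem.List.pyRange (PySem.List.pyGetD hs i 0) 0 (-1))
      = max acc (min (PySem.List.pyGetD (lmRamp 0 hs) i 0)
                     (PySem.List.pyGetD (lmRamp 0 hs.reverse).reverse i 0)) := by
  obtain ⟨iN, rfl⟩ : ∃ iN : ℕ, i = (iN : Int) := ⟨i.toNat, by omega⟩
  have hiN : 1 ≤ iN ∧ iN + 2 ≤ hs.length := by omega
  set jN := hs.length - 1 - iN with hjN
  have hrevlen : (lmRamp 0 hs.reverse).length = hs.length := by
    rw [lmRamp_length, List.length_reverse]
  have hRrev : (lmRamp 0 hs.reverse).reverse.getD iN 0 = (lmRamp 0 hs.reverse).getD jN 0 := by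
    rw [getD_reverse _ iN (by rw [hrevlen]; omega), hrevlen]
  have hIrev : hs.reverse.getD jN 0 = hs.getD iN 0 := by
    rw [getD_reverse _ jN (by omega)]
    congr 1
    omega
  rw [PySem.List.pyGetD_natCast, PySem.List.pyGetD_natCast, PySem.List.pyGetD_natCast, hRrev]
  set hI := hs.getD iN 0 with hhI
  set Li := (lmRamp 0 hs).getD iN 0 with hLi
  set Ri := (lmRamp 0 hs.reverse).getD jN 0 with hRi
  have hLnn : 0 ≤ Li := lmRamp_nonneg 0 hs iN
  have hRnn : 0 ≤ Ri := lmRamp_nonneg 0 hs.reverse jN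
  have hLmax : Li ≤ max 0 hI := lmRamp_le_max hs iN (by omega)
  have hRight2Left : ∀ p : Int,
      lmRight hs (hs.length : Int) (iN : Int) 1 p = lmLeft hs.reverse (jN : Int) 1 p := by
    intro p
    rw [lmRight_eq hs (iN : Int) 1 p (by omega)]
    congr 1
    omega
  by_cases hIpos : 1 ≤ hI
  · -- interesting case: positive height at i
    have hLle : Li ≤ hI := by omega
    have hL1 : 1 ≤ Li := by
      apply lmRamp_ge hs iN (by omega) 1 (by omega)
      intro j hj
      have : j = 0 := by omega
      subst this
      simp only [Nat.cast_zero, Nat.sub_zero, sub_zero]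
      omega
    have hR1 : 1 ≤ Ri := by
      apply lmRamp_ge hs.reverse jN (by rw [List.length_reverse]; omega) 1 (by omega)
      intro j hj
      have : j = 0 := by omega
      subst this
      simp only [Nat.cast_zero, Nat.sub_zero, sub_zero]
      rw [hIrev]
      omega
    set M := min Li Ri with hM
    -- every candidate value is at most its peak height p
    have hval_le : ∀ p ∈ PySem.List.pyRange hI 0 (-1),
        min (lmLeft hs (iN : Int) 1 p) (lmRight hs (hs.length : Int) (iN : Int) 1 p) ≤ p := by
      intro p hp
      rw [PySem.List.mem_pyRange_neg_one] at hp
      have := lmLeft_le hs (iN : Int) 1 p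
      omega
    rw [lmInner_eq_foldl hs (iN : Int) _ acc hval_le]
    -- every candidate value is at most M
    have hval_leM : ∀ p ∈ PySem.List.pyRange hI 0 (-1),
        min (lmLeft hs (iN : Int) 1 p) (lmRight hs (hs.length : Int) (iN : Int) 1 p) ≤ M := by
      intro p hp
      rw [PySem.List.mem_pyRange_neg_one] at hp
      rw [hRight2Left p]
      set lh := lmLeft hs (iN : Int) 1 p with hlh
      set rh := lmLeft hs.reverse (jN : Int) 1 p with hrh
      have hlh1 : 1 ≤ lh := (lmLeft_sound hs (iN : Int) 1 p).1
      have hrh1 : 1 ≤ rh := (lmLeft_sound hs.reverse (jN : Int) 1 p).1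
      set v := min lh rh with hv
      have hvLi : v ≤ Li :=
        lmLeft_le_ramp hs iN (by omega) p v (by omega)
          (by have := lmLeft_le hs (iN : Int) 1 p; omega) (by omega) (by omega)
      have hvRi : v ≤ Ri :=
        lmLeft_le_ramp hs.reverse jN (by rw [List.length_reverse]; omega) p v (by omega)
          (by have := lmLeft_le hs.reverse (jN : Int) 1 p; omega)
          (by rw [hIrev]; omega) (by omega)
      omega
    -- M itself is attained, at peak height M
    have hMfullL : lmLeft hs (iN : Int) 1 M = M :=
      lmLeft_ramp_full hs iN (by omega) M (by omega) (by omega)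
    have hMfullR : lmLeft hs.reverse (jN : Int) 1 M = M :=
      lmLeft_ramp_full hs.reverse jN (by rw [List.length_reverse]; omega) M (by omega) (by omega)
    have hMmem : M ∈ PySem.List.pyRange hI 0 (-1) := by
      rw [PySem.List.mem_pyRange_neg_one]
      omega
    apply le_antisymm
    · apply foldl_max_le _ _ _ (by omega)
      intro x hx
      rw [List.mem_map] at hx
      obtain ⟨p, hp, rfl⟩ := hx
      have := hval_leM p hp
      omega
    · obtain ⟨hacc_le, hmem_le⟩ := PySem.List.le_foldl_max
        ((PySem.List.pyRange hI 0 (-1)).map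
          (fun p => min (lmLeft hs (iN : Int) 1 p) (lmRight hs (hs.length : Int) (iN : Int) 1 p))) acc
      have hMin : M ∈ (PySem.List.pyRange hI 0 (-1)).map
          (fun p => min (lmLeft hs (iN : Int) 1 p) (lmRight hs (hs.length : Int) (iN : Int) 1 p)) := by
        rw [List.mem_map]
        exact ⟨M, hMmem, by rw [hRight2Left M, hMfullL, hMfullR]; omega⟩
      have := hmem_le M hMin
      omega
  · -- heights[i] ≤ 0: the peak-height range is empty and L[i] = 0
    rw [PySem.List.pyRange_neg_one_eq_nil (by omega)]
    have : lmInner hs (iN : Int) acc [] = acc := rfl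
    rw [this]
    omega

-- fold congruence over the outer index range, with the acc ≥ 0 invariant
theorem outer_cong (hs : List Int) (l : List Int) (acc : Int) (hacc : 0 ≤ acc)
    (hmem : ∀ i ∈ l, 1 ≤ i ∧ i ≤ (hs.length : Int) - 2) :
    l.foldl (fun acc i =>
        lmInner hs i acc (PySem.List.pyRange (PySem.List.pyGetD hs i 0) 0 (-1))) acc
      = l.foldl (fun best i =>
          max best (min (PySem.List.pyGetD (lmRamp 0 hs) i 0)
                        (PySem.List.pyGetD (lmRamp 0 hs.reverse).reverse i 0))) acc := by
  induction l generalizing acc with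
  | nil => rfl
  | cons i t ih =>
    obtain ⟨hi1, hi2⟩ := hmem i List.mem_cons_self
    simp only [List.foldl_cons]
    rw [inner_step hs i acc hi1 hi2 hacc]
    exact ih _ (by omega) (fun j hj => hmem j (List.mem_cons_of_mem _ hj))

-- ===== VERDICT (by name: the statement is the Claim_ definition above) =====
theorem largest_mountain_2_spec : Claim_equal_largest_mountain_2 := by
  intro hs _
  unfold Spec_largest_mountain_2 largest_mountain_2 largest_mountain_2_alt
  exact outer_cong hs _ 0 (le_refl 0)
    (fun i hi => by
      rw [PySem.List.mem_pyRange_one] at hi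
      omega)
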